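-- pv_equiv track=rewrite | github.com/konszymanski/leetcode-dataset | obfuscated_solutions/python/2466-count-ways-to-build-good-strings/solution_2_l0_l1_l2.py | countGoodStrings
-- ===== SOURCE A (Python) =====
-- def countGoodStrings(low: int, high: int, zero: int, one: int) -> int:
--     v1_754 = [1] + [-1] * high
--     v2_214 = 10 ** 9 + 7
--
--     def v3_125(v4_859):
--         if v1_754[v4_859] != -1:
--             return v1_754[v4_859]
--         v5_381 = 0
--         if v4_859 >= zero:
--             v5_381 = v5_381 + v3_125(v4_859 - zero)
--         if v4_859 >= one:
--             v5_381 = v5_381 + v3_125(v4_859 - one)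
--         v1_754[v4_859] = v5_381 % v2_214
--         return v1_754[v4_859]
--     return sum((v3_125(v4_859) for v4_859 in range(low, high + 1))) % v2_214
-- ===== SOURCE B (Python) =====
-- def countGoodStrings(low: int, high: int, zero: int, one: int) -> int:
--     MOD = 10 ** 9 + 7
--     dp = [1] + [0] * high
--     for i in range(1, high + 1):
--         dp[i] = ((dp[i - zero] if i >= zero else 0)
--                  + (dp[i - one] if i >= one else 0)) % MOD
--     return sum(dp[low:high + 1]) % MOD
-- ===== Notes on version B (the rewrite author's own statement) =====
-- stated objective: alternative
-- what changed: Top-down memoized recursion replaced by bottom-up iterative dp tabulation over lengths 1..high with a final slice sum; no recursion.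
-- outside the precondition, e.g. on countGoodStrings(-1, 0, 1, 1): A returns 2, B returns 1; on countGoodStrings(-1, -1, 1, 1): A returns 1, B returns 0; on countGoodStrings(5, 2, -1, 1): A returns 0, B raises IndexError
import Mathlib
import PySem

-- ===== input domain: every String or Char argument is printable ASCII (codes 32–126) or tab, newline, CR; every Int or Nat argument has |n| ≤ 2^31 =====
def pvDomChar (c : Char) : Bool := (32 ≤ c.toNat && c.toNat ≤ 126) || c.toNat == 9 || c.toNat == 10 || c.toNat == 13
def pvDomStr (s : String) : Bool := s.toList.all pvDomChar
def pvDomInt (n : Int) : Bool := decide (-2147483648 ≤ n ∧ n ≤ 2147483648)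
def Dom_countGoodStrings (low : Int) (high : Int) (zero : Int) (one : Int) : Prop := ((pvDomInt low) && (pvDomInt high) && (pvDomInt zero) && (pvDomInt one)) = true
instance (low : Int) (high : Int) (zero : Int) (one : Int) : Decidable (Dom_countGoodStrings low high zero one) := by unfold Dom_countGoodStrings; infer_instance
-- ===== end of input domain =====

-- B replaces A's top-down memoized recursion by a bottom-up dp table with a final slice sum (same recurrence, iterative).


-- ===== PORT A =====
-- the inner memoized recursion v3_125; the memo list is threaded through as state.
-- fuel is only a termination device: the top-level call hands each index i fuel i.toNat+1,
-- and inside Pre_ every recursive call lowers the index by at least 1, so fuel never runs out.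
def pvA_rec (zero one : Int) : Nat → Int → List Int → Int × List Int
  | 0, _, memo => (0, memo)
  | fuel + 1, i, memo =>
    let cur := PySem.List.pyGetD memo i 0
    if cur ≠ -1 then (cur, memo)
    else
      let p1 := if i ≥ zero then pvA_rec zero one fuel (i - zero) memo else (0, memo)
      let p2 := if i ≥ one then
                  let q := pvA_rec zero one fuel (i - one) p1.2
                  (p1.1 + q.1, q.2)
                else p1
      let memo' := PySem.List.pySetD p2.2 i (PySem.Int.mod p2.1 (10 ^ 9 + 7))
      (PySem.List.pyGetD memo' i 0, memo')

def countGoodStrings (low : Int) (high : Int) (zero : Int) (one : Int) : Int :=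
  let memo : List Int := 1 :: List.replicate high.toNat (-1)      -- [1] + [-1]*high
  let r := (PySem.List.pyRange low (high + 1) 1).foldl
      (fun (acc : Int × List Int) i =>
        let q := pvA_rec zero one (i.toNat + 1) i acc.2
        (acc.1 + q.1, q.2)) (0, memo)
  PySem.Int.mod r.1 (10 ^ 9 + 7)

-- ===== PORT B =====
def countGoodStrings_alt (low : Int) (high : Int) (zero : Int) (one : Int) : Int :=
  let dp0 : List Int := 1 :: List.replicate high.toNat 0          -- [1] + [0]*high
  let dp := (PySem.List.pyRange 1 (high + 1) 1).foldl
      (fun dp i =>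
        PySem.List.pySetD dp i (PySem.Int.mod
          ((if i ≥ zero then PySem.List.pyGetD dp (i - zero) 0 else 0) +
           (if i ≥ one then PySem.List.pyGetD dp (i - one) 0 else 0)) (10 ^ 9 + 7))) dp0
  PySem.Int.mod (PySem.List.slice dp (some low) (some (high + 1))).sum (10 ^ 9 + 7)

-- ===== PRECONDITION & SPEC =====
-- Pre_ is the task's natural domain (nonnegative lengths, positive block lengths) plus the
-- vacuous high < low inputs on which the summed range is empty (excluding those where B's dp
-- loop would read out of range, i.e. zero < 0 or one < 0 with 0 ≤ high).
-- Outside it A either raises (zero ≤ 0 or one ≤ 0 with low ≤ high: unbounded recursion / IndexError)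
-- or, for negative low/high, returns values produced by negative-index wraparound into the memo list.
def Pre_countGoodStrings (low : Int) (high : Int) (zero : Int) (one : Int) : Prop :=
  (1 ≤ zero ∧ 1 ≤ one ∧ 0 ≤ low ∧ 0 ≤ high) ∨
  (high < low ∧ (high < 0 ∨ (0 ≤ high ∧ 0 ≤ zero ∧ 0 ≤ one)))
instance (low : Int) (high : Int) (zero : Int) (one : Int) : Decidable (Pre_countGoodStrings low high zero one) := by unfold Pre_countGoodStrings; infer_instance

def pvWitness_countGoodStrings : Int × Int × Int × Int := (3, 3, 1, 1)

def Spec_countGoodStrings (low : Int) (high : Int) (zero : Int) (one : Int) (out : Int) : Prop := out = countGoodStrings_alt low high zero one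
instance (low : Int) (high : Int) (zero : Int) (one : Int) (out : Int) : Decidable (Spec_countGoodStrings low high zero one out) := by unfold Spec_countGoodStrings; infer_instance

-- ===== CLAIM (what is proved, stated in full; the proofs are below) =====
def Claim_equal_countGoodStrings : Prop := ∀ (low : Int) (high : Int) (zero : Int) (one : Int), Dom_countGoodStrings low high zero one → Pre_countGoodStrings low high zero one → Spec_countGoodStrings low high zero one (countGoodStrings low high zero one)

-- ===== LEMMAS AND PROOFS =====
-- (gRec, its positivity, and everything below exist only for the proofs)

-- the common mathematical recurrence both programs tabulate
def gRec (zero one : Int) : Nat → Int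
  | 0 => 1
  | n + 1 =>
    PySem.Int.mod
      ((if h : 1 ≤ zero ∧ zero ≤ (n + 1 : Int) then gRec zero one (((n : Int) + 1 - zero).toNat) else 0) +
       (if h : 1 ≤ one ∧ one ≤ (n + 1 : Int) then gRec zero one (((n : Int) + 1 - one).toNat) else 0))
      (10 ^ 9 + 7)
  decreasing_by all_goals omega


lemma gRec_nonneg (zero one : Int) (n : Nat) : 0 ≤ gRec zero one n := by
  cases n with
  | zero => simp [gRec]
  | succ n =>
    rw [gRec]
    exact PySem.Int.mod_nonneg _ (by norm_num)

lemma gRec_ne_neg_one (zero one : Int) (n : Nat) : gRec zero one n ≠ -1 := by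
  have := gRec_nonneg zero one n; omega

-- invariant of A's memo list: right length, base entry 1, every entry unset (-1) or correct
def pvInv (high zero one : Int) (memo : List Int) : Prop :=
  memo.length = high.toNat + 1 ∧ memo.getD 0 0 = 1 ∧
  ∀ j : Nat, j < memo.length → memo.getD j 0 = -1 ∨ memo.getD j 0 = gRec zero one j

lemma pvGetD_getD (memo : List Int) (i : Int) (h0 : 0 ≤ i) (h1 : i.toNat < memo.length) :
    PySem.List.pyGetD memo i 0 = memo.getD i.toNat 0 := by
  rw [PySem.List.pyGetD_eq_getElem memo 0 h0 (by omega)]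
  exact (List.getD_eq_getElem memo 0 h1).symm

lemma pvA_rec_correct (high zero one : Int) (hz : 1 ≤ zero) (ho : 1 ≤ one) :
    ∀ (fuel : Nat) (i : Int) (memo : List Int), 0 ≤ i → i ≤ high → i.toNat < fuel →
      pvInv high zero one memo →
      (pvA_rec zero one fuel i memo).1 = gRec zero one i.toNat ∧
      pvInv high zero one (pvA_rec zero one fuel i memo).2 := by
  intro fuel
  induction fuel with
  | zero => intro i memo hi0 _ hf _; omega
  | succ fuel ih =>
    intro i memo hi0 hih hfuel hinv
    obtain ⟨hlen, h0, hmem⟩ := hinv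
    have hilen : i.toNat < memo.length := by omega
    have hget := pvGetD_getD memo i hi0 hilen
    by_cases hc : memo.getD i.toNat 0 = -1
    · -- not memoized: compute the recurrence
      have hi1 : 1 ≤ i := by
        rcases lt_or_ge i 1 with h | h
        · exfalso
          have : i.toNat = 0 := by omega
          rw [this] at hc; rw [h0] at hc; norm_num at hc
        · exact h
      -- first branch (zero)
      have hp1 : (if i ≥ zero then pvA_rec zero one fuel (i - zero) memo else (0, memo)).1
            = (if 1 ≤ zero ∧ zero ≤ i then gRec zero one ((i - zero).toNat) else 0) ∧
          pvInv high zero one (if i ≥ zero then pvA_rec zero one fuel (i - zero) memo else (0, memo)).2 := by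
        by_cases hzi : i ≥ zero
        · have := ih (i - zero) memo (by omega) (by omega) (by omega) ⟨hlen, h0, hmem⟩
          simp only [if_pos hzi, if_pos (by omega : 1 ≤ zero ∧ zero ≤ i)]
          exact this
        · simp only [if_neg hzi, if_neg (by omega : ¬ (1 ≤ zero ∧ zero ≤ i))]
          exact ⟨by trivial, hlen, h0, hmem⟩
      set p1 := if i ≥ zero then pvA_rec zero one fuel (i - zero) memo else (0, memo) with hp1def
      obtain ⟨hp1v, hp1i⟩ := hp1
      obtain ⟨hlen1, h01, hmem1⟩ := hp1i
      -- second branch (one)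
      have hp2 : (if i ≥ one then
              ((p1.1 + (pvA_rec zero one fuel (i - one) p1.2).1), (pvA_rec zero one fuel (i - one) p1.2).2)
            else p1).1
            = (if 1 ≤ zero ∧ zero ≤ i then gRec zero one ((i - zero).toNat) else 0)
              + (if 1 ≤ one ∧ one ≤ i then gRec zero one ((i - one).toNat) else 0) ∧
          pvInv high zero one (if i ≥ one then
              ((p1.1 + (pvA_rec zero one fuel (i - one) p1.2).1), (pvA_rec zero one fuel (i - one) p1.2).2)
            else p1).2 := by
        by_cases hoi : i ≥ one
        · have := ih (i - one) p1.2 (by omega) (by omega) (by omega) ⟨hlen1, h01, hmem1⟩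
          simp only [if_pos hoi, if_pos (by omega : 1 ≤ one ∧ one ≤ i)]
          exact ⟨by rw [hp1v, this.1], this.2⟩
        · simp only [if_neg hoi, if_neg (by omega : ¬ (1 ≤ one ∧ one ≤ i))]
          exact ⟨by rw [hp1v]; ring, hlen1, h01, hmem1⟩
      set p2 := if i ≥ one then
              ((p1.1 + (pvA_rec zero one fuel (i - one) p1.2).1), (pvA_rec zero one fuel (i - one) p1.2).2)
            else p1 with hp2def
      obtain ⟨hp2v, hp2i⟩ := hp2
      obtain ⟨hlen2, h02, hmem2⟩ := hp2i
      -- the stored value is exactly gRec i.toNat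
      have hstore : PySem.Int.mod p2.1 (10 ^ 9 + 7) = gRec zero one i.toNat := by
        have hn : i.toNat = (i.toNat - 1) + 1 := by omega
        rw [hp2v, hn, gRec]
        have e1 : ((i.toNat - 1 : Nat) : Int) + 1 = i := by omega
        rw [e1]
        congr 1
      -- unfold one step of pvA_rec
      have hred : pvA_rec zero one (fuel + 1) i memo =
          (PySem.List.pyGetD (PySem.List.pySetD p2.2 i (PySem.Int.mod p2.1 (10 ^ 9 + 7))) i 0,
           PySem.List.pySetD p2.2 i (PySem.Int.mod p2.1 (10 ^ 9 + 7))) := by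
        rw [pvA_rec]
        rw [if_neg (by rw [hget, hc]; simp)]
      rw [hred]
      have hlen' : (PySem.List.pySetD p2.2 i (PySem.Int.mod p2.1 (10 ^ 9 + 7))).length = memo.length := by
        rw [PySem.List.length_pySetD, hlen2, hlen]
      have hset : PySem.List.pySetD p2.2 i (PySem.Int.mod p2.1 (10 ^ 9 + 7))
          = p2.2.set i.toNat (gRec zero one i.toNat) := by
        rw [PySem.List.pySetD_of_nonneg _ _ hi0, hstore]
      have hgetD : ∀ j : Nat, (p2.2.set i.toNat (gRec zero one i.toNat)).getD j 0
          = if j = i.toNat then gRec zero one i.toNat else p2.2.getD j 0 := by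
        intro j
        by_cases hj : j = i.toNat
        · subst hj
          rw [if_pos rfl]
          have hlt : i.toNat < p2.2.length := by omega
          rw [List.getD_eq_getElem _ 0 (by simpa [List.length_set] using hlt), List.getElem_set_self]
        · rw [if_neg hj]
          by_cases hjl : j < p2.2.length
          · rw [List.getD_eq_getElem _ 0 (by simpa [List.length_set] using hjl),
              List.getD_eq_getElem _ 0 hjl, List.getElem_set_ne (by omega)]
          · rw [List.getD_eq_default _ 0 (by simpa [List.length_set] using not_lt.mp hjl),
              List.getD_eq_default _ 0 (not_lt.mp hjl)]
      constructor
      · rw [hset, pvGetD_getD _ i hi0 (by simp only [List.length_set]; omega), hgetD, if_pos rfl]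
      · refine ⟨by rw [hlen', hlen], ?_, ?_⟩
        · rw [hset, hgetD]
          by_cases h00 : (0 : Nat) = i.toNat
          · rw [if_pos h00, ← h00]; simp [gRec]
          · rw [if_neg h00]; exact h02
        · intro j hj
          rw [hlen'] at hj
          rw [hset, hgetD]
          by_cases hj' : j = i.toNat
          · rw [if_pos hj']; right; rw [hj']
          · rw [if_neg hj']; exact hmem2 j (by omega)
    · -- memoized value
      have hval : memo.getD i.toNat 0 = gRec zero one i.toNat := by
        rcases hmem i.toNat hilen with h | h
        · exact absurd h hc
        · exact h
      rw [pvA_rec]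
      rw [if_pos (by rw [hget, hval]; simpa using gRec_ne_neg_one zero one i.toNat)]
      rw [hget]
      exact ⟨hval, hlen, h0, hmem⟩

-- the summing fold of A
lemma pvA_fold (high zero one : Int) (hz : 1 ≤ zero) (ho : 1 ≤ one) :
    ∀ (l : List Int) (acc : Int) (memo : List Int),
      (∀ i ∈ l, 0 ≤ i ∧ i ≤ high) → pvInv high zero one memo →
      (l.foldl (fun (acc : Int × List Int) i =>
          let q := pvA_rec zero one (i.toNat + 1) i acc.2
          (acc.1 + q.1, q.2)) (acc, memo)).1
        = acc + (l.map (fun i => gRec zero one i.toNat)).sum := by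
  intro l
  induction l with
  | nil => intro acc memo _ _; simp
  | cons x xs ihl =>
    intro acc memo hb hinv
    have hx := hb x (List.mem_cons_self)
    have hrec := pvA_rec_correct high zero one hz ho (x.toNat + 1) x memo hx.1 hx.2 (by omega) hinv
    simp only [List.foldl_cons, List.map_cons, List.sum_cons]
    rw [ihl _ _ (fun i hi => hb i (List.mem_cons_of_mem x hi)) hrec.2, hrec.1]
    ring

-- the initial memo satisfies the invariant
lemma pvInv_init (high zero one : Int) :
    pvInv high zero one (1 :: List.replicate high.toNat (-1)) := by
  refine ⟨by simp, by simp, ?_⟩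
  intro j hj
  cases j with
  | zero => right; simp [gRec]
  | succ j =>
    left
    simp only [List.getD_cons_succ]
    simp at hj
    rw [List.getD_eq_getElem _ 0 (by simpa using hj), List.getElem_replicate]

-- B's dp fold tabulates gRec
lemma pvB_fold (high zero one : Int) (hz : 1 ≤ zero) (ho : 1 ≤ one) :
    ∀ (n : Nat), n ≤ high.toNat →
      ((PySem.List.pyRange 1 ((n : Int) + 1) 1).foldl
        (fun dp i =>
          PySem.List.pySetD dp i (PySem.Int.mod
            ((if i ≥ zero then PySem.List.pyGetD dp (i - zero) 0 else 0) +
             (if i ≥ one then PySem.List.pyGetD dp (i - one) 0 else 0)) (10 ^ 9 + 7)))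
        (1 :: List.replicate high.toNat 0)).length = high.toNat + 1 ∧
      ∀ j : Nat, j ≤ n →
        ((PySem.List.pyRange 1 ((n : Int) + 1) 1).foldl
          (fun dp i =>
            PySem.List.pySetD dp i (PySem.Int.mod
              ((if i ≥ zero then PySem.List.pyGetD dp (i - zero) 0 else 0) +
               (if i ≥ one then PySem.List.pyGetD dp (i - one) 0 else 0)) (10 ^ 9 + 7)))
          (1 :: List.replicate high.toNat 0)).getD j 0 = gRec zero one j := by
  intro n
  induction n with
  | zero =>
    intro _
    rw [PySem.List.pyRange_one_eq_nil (by omega)]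
    refine ⟨by simp, ?_⟩
    intro j hj
    interval_cases j
    simp [gRec]
  | succ n ihn =>
    intro hn
    obtain ⟨ihlen, ihval⟩ := ihn (by omega)
    have hsplit : PySem.List.pyRange 1 ((n : Int) + 1 + 1) 1
        = PySem.List.pyRange 1 ((n : Int) + 1) 1 ++ [(n : Int) + 1] := by
      exact PySem.List.pyRange_one_succ_right (by omega)
    have hcast : ((n + 1 : Nat) : Int) + 1 = (n : Int) + 1 + 1 := by push_cast; ring
    rw [hcast, hsplit, List.foldl_append]
    set dp := (PySem.List.pyRange 1 ((n : Int) + 1) 1).foldl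
        (fun dp i =>
          PySem.List.pySetD dp i (PySem.Int.mod
            ((if i ≥ zero then PySem.List.pyGetD dp (i - zero) 0 else 0) +
             (if i ≥ one then PySem.List.pyGetD dp (i - one) 0 else 0)) (10 ^ 9 + 7)))
        (1 :: List.replicate high.toNat 0) with hdp
    simp only [List.foldl_cons, List.foldl_nil]
    -- the two reads are correct prefix values
    have hv : PySem.Int.mod
        ((if (n : Int) + 1 ≥ zero then PySem.List.pyGetD dp ((n : Int) + 1 - zero) 0 else 0) +
         (if (n : Int) + 1 ≥ one then PySem.List.pyGetD dp ((n : Int) + 1 - one) 0 else 0)) (10 ^ 9 + 7)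
        = gRec zero one (n + 1) := by
      rw [gRec]
      congr 1
      congr 1
      · by_cases hzc : (n : Int) + 1 ≥ zero
        · rw [if_pos hzc, dif_pos (by omega : 1 ≤ zero ∧ zero ≤ (n : Int) + 1)]
          rw [pvGetD_getD dp _ (by omega) (by omega)]
          exact ihval _ (by omega)
        · rw [if_neg hzc, dif_neg (by omega : ¬ (1 ≤ zero ∧ zero ≤ (n : Int) + 1))]
      · by_cases hoc : (n : Int) + 1 ≥ one
        · rw [if_pos hoc, dif_pos (by omega : 1 ≤ one ∧ one ≤ (n : Int) + 1)]
          rw [pvGetD_getD dp _ (by omega) (by omega)]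
          exact ihval _ (by omega)
        · rw [if_neg hoc, dif_neg (by omega : ¬ (1 ≤ one ∧ one ≤ (n : Int) + 1))]
    rw [hv]
    have hset : PySem.List.pySetD dp ((n : Int) + 1) (gRec zero one (n + 1))
        = dp.set (n + 1) (gRec zero one (n + 1)) := by
      rw [PySem.List.pySetD_of_nonneg _ _ (by omega)]
      congr 1
    rw [hset]
    refine ⟨by simp [List.length_set, ihlen], ?_⟩
    intro j hj
    by_cases hj' : j = n + 1
    · subst hj'
      rw [List.getD_eq_getElem _ 0 (by simp only [List.length_set]; omega), List.getElem_set_self]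
    · rw [List.getD_eq_getElem _ 0 (by simp only [List.length_set]; omega),
        List.getElem_set_ne (by omega),
        ← List.getD_eq_getElem _ 0 (by omega)]
      exact ihval j (by omega)

-- B's dp loop never changes the list length
lemma pvB_len (zero one : Int) : ∀ (l : List Int) (dp : List Int),
    (l.foldl (fun dp i =>
        PySem.List.pySetD dp i (PySem.Int.mod
          ((if i ≥ zero then PySem.List.pyGetD dp (i - zero) 0 else 0) +
           (if i ≥ one then PySem.List.pyGetD dp (i - one) 0 else 0)) (10 ^ 9 + 7))) dp).length
      = dp.length := by
  intro l
  induction l with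
  | nil => intro dp; rfl
  | cons x xs ih => intro dp; rw [List.foldl_cons, ih, PySem.List.length_pySetD]

-- ===== VERDICT (by name: the statement is the Claim_ definition above) =====
theorem countGoodStrings_spec : Claim_equal_countGoodStrings := by
  intro low high zero one hdom hpre
  unfold Spec_countGoodStrings countGoodStrings countGoodStrings_alt
  dsimp only
  rcases hpre with ⟨hz, ho, hl, hh⟩ | ⟨hlh, hcase⟩
  swap
  · -- empty summation range: both sides are mod 0 = 0
    rw [PySem.List.pyRange_one_eq_nil (by omega), List.foldl_nil]
    have hlen : ((PySem.List.pyRange 1 (high + 1) 1).foldl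
        (fun dp i =>
          PySem.List.pySetD dp i (PySem.Int.mod
            ((if i ≥ zero then PySem.List.pyGetD dp (i - zero) 0 else 0) +
             (if i ≥ one then PySem.List.pyGetD dp (i - one) 0 else 0)) (10 ^ 9 + 7)))
        (1 :: List.replicate high.toNat 0)).length = high.toNat + 1 := by
      rw [pvB_len]; simp
    have hsl : PySem.List.slice ((PySem.List.pyRange 1 (high + 1) 1).foldl
        (fun dp i =>
          PySem.List.pySetD dp i (PySem.Int.mod
            ((if i ≥ zero then PySem.List.pyGetD dp (i - zero) 0 else 0) +
             (if i ≥ one then PySem.List.pyGetD dp (i - one) 0 else 0)) (10 ^ 9 + 7)))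
        (1 :: List.replicate high.toNat 0)) (some low) (some (high + 1)) = [] := by
      apply List.eq_nil_of_length_eq_zero
      rw [PySem.List.length_slice, hlen]
      unfold PySem.List.clampIdx
      split_ifs <;> omega
    rw [hsl]
    rfl
  have hA := pvA_fold high zero one hz ho (PySem.List.pyRange low (high + 1) 1) 0
      (1 :: List.replicate high.toNat (-1))
      (by intro i hi; rw [PySem.List.mem_pyRange_one] at hi; omega)
      (pvInv_init high zero one)
  rw [hA, zero_add]
  have hB := pvB_fold high zero one hz ho high.toNat (le_refl _)
  have hcast : ((high.toNat : Int) + 1) = high + 1 := by omega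
  rw [hcast] at hB
  obtain ⟨hBlen, hBval⟩ := hB
  congr 1
  set dp := (PySem.List.pyRange 1 (high + 1) 1).foldl
      (fun dp i =>
        PySem.List.pySetD dp i (PySem.Int.mod
          ((if i ≥ zero then PySem.List.pyGetD dp (i - zero) 0 else 0) +
           (if i ≥ one then PySem.List.pyGetD dp (i - one) 0 else 0)) (10 ^ 9 + 7)))
      (1 :: List.replicate high.toNat 0) with hdp
  have hdp_eq : dp = (List.range (high.toNat + 1)).map (gRec zero one) := by
    apply List.ext_getElem (by simpa using hBlen)
    intro j h1 h2
    have hv := hBval j (by omega)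
    rw [List.getD_eq_getElem _ 0 h1] at hv
    rw [hv, List.getElem_map, List.getElem_range]
  rw [hdp_eq, PySem.List.slice_toNat (a := low) (b := high + 1) _ hl (by omega)]
  rw [← List.map_drop, List.range_eq_range', List.drop_range',
    List.take_of_length_le (by simp only [List.length_map, List.length_range']; omega)]
  rw [PySem.List.pyRange_one, List.map_map, List.range'_eq_map_range, List.map_map]
  have hn : (high + 1 - low).toNat = high.toNat + 1 - low.toNat := by omega
  rw [hn]
  congr 1
  apply List.map_congr_left
  intro k _
  simp only [Function.comp_apply]
  congr 1
  omega
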